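-- pv_equiv track=rewrite | github.com/GenryEden/kpolyakovName | 2568.py | countDels
-- ===== SOURCE A (Python) =====
-- def countDels(x):
-- 	cnt = 0
-- 	last = 0
-- 	for i in range(1, x):
-- 		if x % i == 0:
-- 			last = i
-- 			cnt += 1
-- 	return cnt+1, last
-- ===== SOURCE B (Python) =====
-- def countDels(x):
-- 	if x <= 1:
-- 		return (1, 0)
-- 	cnt = 0
-- 	spf = 0
-- 	d = 1
-- 	while d * d <= x:
-- 		if x % d == 0:
-- 			cnt += 1 if d * d == x else 2
-- 			if d > 1 and spf == 0:
-- 				spf = d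
-- 		d += 1
-- 	if spf == 0:
-- 		spf = x
-- 	return (cnt, x // spf)
-- ===== Notes on version B (the rewrite author's own statement) =====
-- stated objective: faster
-- what changed: B scans d only up to sqrt(x), counting each divisor pair (d, x//d) at once and deriving the largest proper divisor as x // (smallest factor > 1), instead of A's trial division over all i in [1, x).
import Mathlib
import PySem

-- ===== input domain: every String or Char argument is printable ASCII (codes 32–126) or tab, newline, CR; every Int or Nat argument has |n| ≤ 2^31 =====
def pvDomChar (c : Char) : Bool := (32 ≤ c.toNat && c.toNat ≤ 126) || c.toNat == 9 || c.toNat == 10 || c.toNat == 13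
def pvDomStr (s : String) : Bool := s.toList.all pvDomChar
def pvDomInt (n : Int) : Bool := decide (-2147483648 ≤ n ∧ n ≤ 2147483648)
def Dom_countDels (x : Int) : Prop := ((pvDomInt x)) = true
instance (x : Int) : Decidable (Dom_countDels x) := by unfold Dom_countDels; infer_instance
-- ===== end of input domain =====

-- B replaces A's O(x) trial division by an O(sqrt(x)) scan over divisor pairs; equal return value proved below.

-- ===== PORT A =====
-- A's loop `for i in range(1, x)` accumulating (cnt, last); returns (cnt+1, last) as a list.
def countDels (x : Int) : List Int :=
  let s := (PySem.List.pyRange 1 x 1).foldl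
    (fun (s : Int × Int) i => if PySem.Int.mod x i = 0 then (s.1 + 1, i) else s) (0, 0)
  [s.1 + 1, s.2]

-- ===== PORT B =====
-- B's `while d * d <= x` loop; hd is only a totality guard (the measure needs 1 ≤ d).
def altLoop (x d cnt spf : Int) (hd : 1 ≤ d) : Int × Int :=
  if h : d * d ≤ x then
    altLoop x (d + 1)
      (if PySem.Int.mod x d = 0 then cnt + (if d * d = x then 1 else 2) else cnt)
      (if PySem.Int.mod x d = 0 ∧ 1 < d ∧ spf = 0 then d else spf)
      (by omega)
  else (cnt, spf)
termination_by (x + 1 - d).toNat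
decreasing_by
  have h1 : d ≤ d * d := by nlinarith
  omega

def countDels_alt (x : Int) : List Int :=
  if x ≤ 1 then [1, 0]
  else
    let s := altLoop x 1 0 0 (le_refl 1)
    let spf := if s.2 = 0 then x else s.2
    [s.1, PySem.Int.floordiv x spf]

-- ===== PRECONDITION & SPEC =====
def Spec_countDels (x : Int) (out : List Int) : Prop := out = countDels_alt x
instance (x : Int) (out : List Int) : Decidable (Spec_countDels x out) := by unfold Spec_countDels; infer_instance

-- ===== CLAIM (what is proved, stated in full; the proofs are below) =====
def Claim_equal_countDels : Prop := ∀ (x : Int), Dom_countDels x → Spec_countDels x (countDels x)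

-- ===== LEMMAS AND PROOFS =====

-- divisors of x in [1, x]
def Dv (x : Int) : Finset Int := ((PySem.List.pyRange 1 (x+1) 1).toFinset).filter (fun e => x % e = 0)
-- divisors e of x with d ≤ e and d ≤ x/e (stated multiplicatively): the pairs the B loop has not yet counted
def Sd (x d : Int) : Finset Int := (Dv x).filter (fun e => d ≤ e ∧ d * e ≤ x)
-- candidate smallest nontrivial factors still ahead of the B loop at counter d
def Td (x d : Int) : Finset Int := (Dv x).filter (fun e => d ≤ e ∧ 2 ≤ e ∧ e * e ≤ x)
-- proper divisors of x in [a, x)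
def Pa (x a : Int) : Finset Int := ((PySem.List.pyRange a x 1).toFinset).filter (fun e => x % e = 0)

lemma mem_Dv {x e : Int} : e ∈ Dv x ↔ 1 ≤ e ∧ e ≤ x ∧ e ∣ x := by
  simp only [Dv, Finset.mem_filter, List.mem_toFinset, PySem.List.mem_pyRange_one]
  constructor
  · rintro ⟨⟨h1, h2⟩, h3⟩
    exact ⟨h1, by omega, Int.dvd_of_emod_eq_zero h3⟩
  · rintro ⟨h1, h2, h3⟩
    exact ⟨⟨h1, by omega⟩, Int.emod_eq_zero_of_dvd h3⟩

lemma mem_Pa {x a e : Int} : e ∈ Pa x a ↔ a ≤ e ∧ e < x ∧ e ∣ x := by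
  simp only [Pa, Finset.mem_filter, List.mem_toFinset, PySem.List.mem_pyRange_one]
  constructor
  · rintro ⟨⟨h1, h2⟩, h3⟩
    exact ⟨h1, h2, Int.dvd_of_emod_eq_zero h3⟩
  · rintro ⟨h1, h2, h3⟩
    exact ⟨⟨h1, h2⟩, Int.emod_eq_zero_of_dvd h3⟩

lemma Sd_zero {x d : Int} (hd : 1 ≤ d) (h : ¬ d * d ≤ x) : Sd x d = ∅ := by
  push_neg at h
  ext e
  simp only [Sd, Finset.mem_filter, mem_Dv, Finset.notMem_empty, iff_false, not_and]
  rintro ⟨he1, hex, hdvd⟩ hde hmul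
  nlinarith

lemma Td_zero {x d : Int} (hd : 1 ≤ d) (h : ¬ d * d ≤ x) : Td x d = ∅ := by
  push_neg at h
  ext e
  simp only [Td, Finset.mem_filter, mem_Dv, Finset.notMem_empty, iff_false, not_and]
  rintro ⟨he1, hex, hdvd⟩ hde h2e hmul
  nlinarith

-- one step of the pair count: the divisors with min(e, x/e) = d are {d, x/d}
lemma Sd_step {x d : Int} (hx : 2 ≤ x) (hd : 1 ≤ d) (h : d * d ≤ x) :
    ((Sd x d).card : Int) =
      (if x % d = 0 then (if d * d = x then 1 else 2) else 0) + ((Sd x (d+1)).card : Int) := by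
  have hcard := Finset.filter_card_add_filter_neg_card_eq_card
    (s := Sd x d) (p := fun e => d + 1 ≤ e ∧ (d + 1) * e ≤ x)
  have hA : (Sd x d).filter (fun e => d + 1 ≤ e ∧ (d + 1) * e ≤ x) = Sd x (d+1) := by
    ext e
    simp only [Sd, Finset.mem_filter, mem_Dv, Finset.filter_filter]
    constructor
    · rintro ⟨hDv, _, hp⟩
      exact ⟨hDv, hp⟩
    · rintro ⟨hDv, hp1, hp2⟩
      obtain ⟨he1, hex, hdvd⟩ := hDv
      refine ⟨⟨he1, hex, hdvd⟩, ⟨by omega, by nlinarith⟩, hp1, hp2⟩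
  rw [hA] at hcard
  set B := (Sd x d).filter (fun e => ¬ (d + 1 ≤ e ∧ (d + 1) * e ≤ x)) with hBdef
  by_cases hdvd : d ∣ x
  · obtain ⟨c, hc⟩ := hdvd
    have hc1 : 1 ≤ c := by nlinarith
    have hdc : d ≤ c := by nlinarith
    have hmemB : ∀ e, e ∈ B ↔ e = d ∨ e = c := by
      intro e
      rw [hBdef]
      simp only [Sd, Finset.mem_filter, mem_Dv, not_and, not_le]
      constructor
      · rintro ⟨⟨⟨he1, hex, hedvd⟩, hde, hmul⟩, hneg⟩
        by_cases hed : e ≤ d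
        · left; omega
        · right
          have hde1 : d + 1 ≤ e := by omega
          have hlt : x < (d + 1) * e := hneg hde1
          obtain ⟨m, hm⟩ := hedvd
          have hm1 : 1 ≤ m := by nlinarith
          have hmd : m = d := by nlinarith
          have hde : d * c = d * e := by rw [← hc, hm, hmd]; ring
          exact (mul_left_cancel₀ (by omega : (d:Int) ≠ 0) hde).symm
      · intro he
        rcases he with rfl | he
        · refine ⟨⟨⟨hd, by nlinarith, ⟨c, hc⟩⟩, le_refl _, h⟩, ?_⟩
          intro hcon; omega
        · subst he
          refine ⟨⟨⟨by omega, by nlinarith, ⟨d, by linarith [hc, mul_comm d e]⟩⟩, hdc, by nlinarith⟩, ?_⟩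
          intro hc1e
          nlinarith
    have hmod : x % d = 0 := Int.emod_eq_zero_of_dvd ⟨c, hc⟩
    rw [hmod]
    by_cases hsq : d * d = x
    · have hcd : c = d := by nlinarith
      have hB : B = {d} := by
        ext e; rw [hmemB e, hcd]
        simp
      rw [hB] at hcard
      simp only [Finset.card_singleton] at hcard
      simp only [if_pos hsq, reduceIte]
      omega
    · have hcd : c ≠ d := by
        intro hcd; rw [hcd] at hc; exact hsq hc.symm
      have hB : B = {d, c} := by
        ext e; rw [hmemB e]
        simp [or_comm]
      rw [hB] at hcard
      rw [Finset.card_insert_of_notMem (by simpa using hcd.symm), Finset.card_singleton] at hcard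
      simp only [if_neg hsq, reduceIte]
      omega
  · have hB : B = ∅ := by
      ext e
      rw [hBdef]
      simp only [Sd, Finset.mem_filter, mem_Dv, not_and, not_le, Finset.notMem_empty, iff_false,
        not_and]
      rintro ⟨⟨he1, hex, hedvd⟩, hde, hmul⟩ hneg
      by_cases hed : e ≤ d
      · have : e = d := by omega
        subst this
        exact hdvd hedvd
      · have hde1 : d + 1 ≤ e := by omega
        have hlt : x < (d + 1) * e := hneg hde1
        obtain ⟨m, hm⟩ := hedvd
        have hm1 : 1 ≤ m := by nlinarith
        have hmd : m = d := by nlinarith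
        exact hdvd ⟨e, by rw [hm, hmd]; ring⟩
    have hmod : ¬ x % d = 0 := fun hm => hdvd (Int.dvd_of_emod_eq_zero hm)
    rw [hB] at hcard
    simp only [Finset.card_empty, add_zero] at hcard
    rw [if_neg hmod, hcard]
    omega

lemma altLoop_fst (x : Int) (hx : 2 ≤ x) :
    ∀ (k : Nat) (d cnt spf : Int) (hd : 1 ≤ d), (x + 1 - d).toNat = k →
      (altLoop x d cnt spf hd).1 = cnt + ((Sd x d).card : Int) := by
  intro k
  induction k using Nat.strong_induction_on with
  | _ k ih =>
    intro d cnt spf hd hk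
    rw [altLoop]
    by_cases h : d * d ≤ x
    · have hdx : d ≤ x := by nlinarith
      rw [dif_pos h]
      rw [ih ((x + 1 - (d+1)).toNat) (by omega) (d+1) _ _ (by omega) rfl]
      have hmod : PySem.Int.mod x d = x % d := PySem.Int.mod_eq_emod_of_pos (by omega)
      rw [hmod, Sd_step hx hd h]
      by_cases h0 : x % d = 0 <;> by_cases h1 : d * d = x <;> simp [h0, h1] <;> ring
    · rw [dif_neg h, Sd_zero hd h]
      simp

lemma altLoop_snd_frozen (x : Int) :
    ∀ (k : Nat) (d cnt spf : Int) (hd : 1 ≤ d), (x + 1 - d).toNat = k → spf ≠ 0 →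
      (altLoop x d cnt spf hd).2 = spf := by
  intro k
  induction k using Nat.strong_induction_on with
  | _ k ih =>
    intro d cnt spf hd hk hspf
    rw [altLoop]
    by_cases h : d * d ≤ x
    · have hdx : d ≤ x := by nlinarith
      rw [dif_pos h]
      have hcond : ¬ (PySem.Int.mod x d = 0 ∧ 1 < d ∧ spf = 0) := by
        rintro ⟨_, _, h0⟩; exact hspf h0
      rw [if_neg hcond]
      exact ih ((x + 1 - (d+1)).toNat) (by omega) (d+1) _ _ (by omega) rfl hspf
    · rw [dif_neg h]

lemma altLoop_snd (x : Int) (hx : 2 ≤ x) :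
    ∀ (k : Nat) (d cnt : Int) (hd : 1 ≤ d), (x + 1 - d).toNat = k → 2 ≤ d →
      (Td x d = ∅ ∧ (altLoop x d cnt 0 hd).2 = 0) ∨
      ((altLoop x d cnt 0 hd).2 ∈ Td x d ∧ ∀ e ∈ Td x d, (altLoop x d cnt 0 hd).2 ≤ e) := by
  intro k
  induction k using Nat.strong_induction_on with
  | _ k ih =>
    intro d cnt hd hk hd2
    rw [altLoop]
    by_cases h : d * d ≤ x
    · have hdx : d ≤ x := by nlinarith
      rw [dif_pos h]
      have hmod : PySem.Int.mod x d = x % d := PySem.Int.mod_eq_emod_of_pos (by omega)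
      by_cases hcond : PySem.Int.mod x d = 0 ∧ 1 < d ∧ (0:Int) = 0
      · rw [if_pos hcond]
        have hdvd : d ∣ x := Int.dvd_of_emod_eq_zero (hmod ▸ hcond.1)
        have hfroz := altLoop_snd_frozen x ((x + 1 - (d+1)).toNat) (d+1)
          (if PySem.Int.mod x d = 0 then cnt + if d * d = x then 1 else 2 else cnt) d
          (by omega) rfl (by omega)
        rw [hfroz]
        right
        constructor
        · rw [Td, Finset.mem_filter, mem_Dv]
          exact ⟨⟨by omega, hdx, hdvd⟩, le_refl _, hd2, h⟩
        · intro e he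
          rw [Td, Finset.mem_filter] at he
          exact he.2.1
      · rw [if_neg hcond]
        have hTd : Td x d = Td x (d+1) := by
          ext e
          simp only [Td, Finset.mem_filter, mem_Dv]
          constructor
          · rintro ⟨⟨he1, hex, hedvd⟩, hde, h2e, hee⟩
            refine ⟨⟨he1, hex, hedvd⟩, ?_, h2e, hee⟩
            rcases eq_or_lt_of_le hde with rfl | hlt
            · exfalso
              exact hcond ⟨hmod ▸ Int.emod_eq_zero_of_dvd hedvd, by omega, rfl⟩
            · omega
          · rintro ⟨hDv, hde, h2e, hee⟩
            exact ⟨hDv, by omega, h2e, hee⟩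
        rw [hTd]
        exact ih ((x + 1 - (d+1)).toNat) (by omega) (d+1) _ (by omega) rfl (by omega)
    · rw [dif_neg h]
      exact Or.inl ⟨Td_zero hd h, rfl⟩

lemma A_loop (x : Int) (hx : 2 ≤ x) :
    ∀ (k : Nat) (a c l : Int) (_ : 1 ≤ a), (x - a).toNat = k →
      ∃ l', (PySem.List.pyRange a x 1).foldl
          (fun (s : Int × Int) i => if PySem.Int.mod x i = 0 then (s.1 + 1, i) else s) (c, l)
        = (c + ((Pa x a).card : Int), l') ∧
        ((Pa x a = ∅ ∧ l' = l) ∨ (l' ∈ Pa x a ∧ ∀ e ∈ Pa x a, e ≤ l')) := by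
  intro k
  induction k using Nat.strong_induction_on with
  | _ k ih =>
    intro a c l ha hk
    by_cases hax : a < x
    · rw [PySem.List.pyRange_one_cons hax, List.foldl_cons]
      have hmod : PySem.Int.mod x a = x % a := PySem.Int.mod_eq_emod_of_pos (by omega)
      by_cases hdvd : a ∣ x
      · have h0 : PySem.Int.mod x a = 0 := hmod ▸ Int.emod_eq_zero_of_dvd hdvd
        rw [if_pos h0]
        obtain ⟨l', heq, hprop⟩ := ih ((x - (a+1)).toNat) (by omega) (a+1) (c+1) a (by omega) rfl
        have hPa : Pa x a = insert a (Pa x (a+1)) := by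
          ext e
          simp only [mem_Pa, Finset.mem_insert]
          constructor
          · rintro ⟨hae, hex, hedvd⟩
            rcases eq_or_lt_of_le hae with rfl | hlt
            · exact Or.inl rfl
            · exact Or.inr ⟨by omega, hex, hedvd⟩
          · rintro (rfl | ⟨hae, hex, hedvd⟩)
            · exact ⟨le_refl _, hax, hdvd⟩
            · exact ⟨by omega, hex, hedvd⟩
        have hnotmem : a ∉ Pa x (a+1) := by
          rw [mem_Pa]; rintro ⟨hcon, -, -⟩; omega
        refine ⟨l', ?_, ?_⟩
        · rw [heq, hPa, Finset.card_insert_of_notMem hnotmem]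
          simp only [Prod.mk.injEq, and_true]
          push_cast
          ring
        · right
          rcases hprop with ⟨hemp, rfl⟩ | ⟨hmem, hmax⟩
          · rw [hPa, hemp]
            constructor
            · simp
            · intro e he
              simp only [Finset.insert_empty, Finset.mem_singleton] at he
              omega
          · rw [hPa]
            constructor
            · exact Finset.mem_insert_of_mem hmem
            · intro e he
              rcases Finset.mem_insert.mp he with rfl | he'
              · have := (mem_Pa.mp hmem).1; omega
              · exact hmax e he'
      · have h0 : ¬ PySem.Int.mod x a = 0 := by
          rw [hmod]; exact fun hm => hdvd (Int.dvd_of_emod_eq_zero hm)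
        rw [if_neg h0]
        obtain ⟨l', heq, hprop⟩ := ih ((x - (a+1)).toNat) (by omega) (a+1) c l (by omega) rfl
        have hPa : Pa x a = Pa x (a+1) := by
          ext e
          simp only [mem_Pa]
          constructor
          · rintro ⟨hae, hex, hedvd⟩
            rcases eq_or_lt_of_le hae with rfl | hlt
            · exact absurd hedvd hdvd
            · exact ⟨by omega, hex, hedvd⟩
          · rintro ⟨hae, hex, hedvd⟩
            exact ⟨by omega, hex, hedvd⟩
        rw [hPa]
        exact ⟨l', heq, hprop⟩
    · rw [PySem.List.pyRange_one_eq_nil (by omega)]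
      have hPa : Pa x a = ∅ := by
        ext e
        simp only [mem_Pa, Finset.notMem_empty, iff_false, not_and]
        intro h1 h2
        omega
      exact ⟨l, by rw [hPa]; simp, Or.inl ⟨hPa, rfl⟩⟩

-- the two head components agree: #divisors = proper count + 1
lemma card_Sd_one (x : Int) (hx : 2 ≤ x) :
    ((Sd x 1).card : Int) = ((Pa x 1).card : Int) + 1 := by
  have hS : Sd x 1 = Dv x := by
    ext e
    simp only [Sd, Finset.mem_filter, mem_Dv]
    constructor
    · rintro ⟨h, -⟩; exact h
    · rintro ⟨h1, h2, h3⟩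
      exact ⟨⟨h1, h2, h3⟩, h1, by omega⟩
  have hD : Dv x = insert x (Pa x 1) := by
    ext e
    simp only [mem_Dv, mem_Pa, Finset.mem_insert]
    constructor
    · rintro ⟨h1, h2, h3⟩
      rcases eq_or_lt_of_le h2 with rfl | hlt
      · exact Or.inl rfl
      · exact Or.inr ⟨h1, hlt, h3⟩
    · rintro (rfl | ⟨h1, h2, h3⟩)
      · exact ⟨by omega, le_refl _, dvd_refl _⟩
      · exact ⟨h1, by omega, h3⟩
  have hnot : x ∉ Pa x 1 := by
    rw [mem_Pa]; rintro ⟨-, hcon, -⟩; omega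
  rw [hS, hD, Finset.card_insert_of_notMem hnot]
  push_cast
  ring

-- the largest proper divisor is x / p, p the smallest factor > 1 (= x when none ≤ sqrt x)
lemma last_eq_one (x l : Int) (hx : 2 ≤ x) (hT : Td x 2 = ∅)
    (hmem : l ∈ Pa x 1) (hmax : ∀ e ∈ Pa x 1, e ≤ l) : l = 1 := by
  obtain ⟨hl1, hlx, hldvd⟩ := mem_Pa.mp hmem
  by_contra hne
  have hl2 : 2 ≤ l := by omega
  obtain ⟨m, hm⟩ := hldvd
  have hm1 : 1 ≤ m := by nlinarith
  have hm2 : 2 ≤ m := by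
    rcases eq_or_lt_of_le hm1 with rfl | _
    · omega
    · omega
  by_cases hsq : l * l ≤ x
  · have : l ∈ Td x 2 := by
      rw [Td, Finset.mem_filter, mem_Dv]
      exact ⟨⟨by omega, by omega, ⟨m, hm⟩⟩, hl2, hl2, hsq⟩
    rw [hT] at this
    exact absurd this (Finset.notMem_empty l)
  · push_neg at hsq
    have hml : m < l := by nlinarith
    have : m ∈ Td x 2 := by
      rw [Td, Finset.mem_filter, mem_Dv]
      refine ⟨⟨by omega, by nlinarith, ⟨l, by rw [hm]; ring⟩⟩, hm2, hm2, by nlinarith⟩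
    rw [hT] at this
    exact absurd this (Finset.notMem_empty m)

lemma last_eq_cofactor (x l s : Int) (hx : 2 ≤ x)
    (hs : s ∈ Td x 2) (hsmin : ∀ e ∈ Td x 2, s ≤ e)
    (hmem : l ∈ Pa x 1) (hmax : ∀ e ∈ Pa x 1, e ≤ l) : s * l = x := by
  obtain ⟨⟨hs1, hsx, hsdvd⟩, hs2, -, hss⟩ := by
    simpa only [Td, Finset.mem_filter, mem_Dv] using hs
  obtain ⟨hl1, hlx, hldvd⟩ := mem_Pa.mp hmem
  obtain ⟨c, hc⟩ := hsdvd
  have hc1 : 1 ≤ c := by nlinarith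
  have hcx : c < x := by nlinarith
  have hcl : c ≤ l := hmax c (mem_Pa.mpr ⟨hc1, hcx, ⟨s, by rw [hc]; ring⟩⟩)
  obtain ⟨m, hm⟩ := hldvd
  have hm1 : 1 ≤ m := by nlinarith
  have hm2 : 2 ≤ m := by
    rcases eq_or_lt_of_le hm1 with rfl | _
    · omega
    · omega
  -- s ≤ m for every nontrivial cofactor m
  have hsm : s ≤ m := by
    by_cases hmm : m * m ≤ x
    · exact hsmin m (by
        rw [Td, Finset.mem_filter, mem_Dv]
        exact ⟨⟨by omega, by nlinarith, ⟨l, by rw [hm]; ring⟩⟩, hm2, hm2, hmm⟩)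
    · push_neg at hmm
      have hlm : l < m := by nlinarith
      by_cases hl2 : 2 ≤ l
      · have hsl : s ≤ l := hsmin l (by
          rw [Td, Finset.mem_filter, mem_Dv]
          exact ⟨⟨by omega, by omega, ⟨m, hm⟩⟩, hl2, hl2, by nlinarith⟩)
        omega
      · have hl1' : l = 1 := by omega
        have hmx : m = x := by rw [hm, hl1']; ring
        nlinarith
  have hlc : l ≤ c := by nlinarith
  have : l = c := le_antisymm hlc hcl
  rw [this, ← hc]

lemma countDels_eq (x : Int) :
    countDels x =
      [((PySem.List.pyRange 1 x 1).foldl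
          (fun (s : Int × Int) i => if PySem.Int.mod x i = 0 then (s.1 + 1, i) else s) (0, 0)).1 + 1,
       ((PySem.List.pyRange 1 x 1).foldl
          (fun (s : Int × Int) i => if PySem.Int.mod x i = 0 then (s.1 + 1, i) else s) (0, 0)).2] := rfl

lemma countDels_alt_eq (x : Int) (h : ¬ x ≤ 1) :
    countDels_alt x =
      [(altLoop x 1 0 0 (le_refl 1)).1,
       PySem.Int.floordiv x
         (if (altLoop x 1 0 0 (le_refl 1)).2 = 0 then x else (altLoop x 1 0 0 (le_refl 1)).2)] := by
  unfold countDels_alt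
  rw [if_neg h]

-- ===== VERDICT (by name: the statement is the Claim_ definition above) =====
theorem countDels_spec : Claim_equal_countDels := by
  intro x _
  unfold Spec_countDels
  by_cases hx1 : x ≤ 1
  · unfold countDels countDels_alt
    rw [if_pos hx1, PySem.List.pyRange_one_eq_nil (by omega)]
    simp
  · push_neg at hx1
    have hx : 2 ≤ x := by omega
    obtain ⟨l', heq, hprop⟩ := A_loop x hx ((x - 1).toNat) 1 0 0 (le_refl 1) rfl
    have hAeq : countDels x = [((Pa x 1).card : Int) + 1, l'] := by
      rw [countDels_eq, heq]
      norm_num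
    rw [hAeq, countDels_alt_eq x (by omega)]
    -- the B loop, unrolled once at d = 1
    have hmod1 : PySem.Int.mod x 1 = 0 := by
      rw [PySem.Int.mod_eq_emod_of_pos (by omega)]; exact Int.emod_one x
    have hne : ¬ (1 : Int) = x := by omega
    have hunroll : altLoop x 1 0 0 (le_refl 1) = altLoop x 2 2 0 (by omega) := by
      rw [altLoop]
      rw [dif_pos (by nlinarith : (1:Int) * 1 ≤ x)]
      simp [hmod1, hne]
    have hfst : (altLoop x 1 0 0 (le_refl 1)).1 = ((Pa x 1).card : Int) + 1 := by
      rw [altLoop_fst x hx ((x + 1 - 1).toNat) 1 0 0 (le_refl 1) rfl, card_Sd_one x hx]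
      ring
    have hsnd := altLoop_snd x hx ((x + 1 - 2).toNat) 2 2 (by omega) rfl (le_refl 2)
    rw [← hunroll] at hsnd
    -- l' is the maximal proper divisor (Pa x 1 is nonempty since 1 ∈ it)
    have h1mem : (1:Int) ∈ Pa x 1 := mem_Pa.mpr ⟨le_refl 1, by omega, one_dvd x⟩
    have hlast : l' ∈ Pa x 1 ∧ ∀ e ∈ Pa x 1, e ≤ l' := by
      rcases hprop with ⟨hemp, -⟩ | h
      · rw [hemp] at h1mem
        exact absurd h1mem (Finset.notMem_empty 1)
      · exact h
    rcases hsnd with ⟨hT, hs0⟩ | ⟨hsmem, hsmin⟩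
    · -- no factor in [2, sqrt x]: x has no proper divisor but 1; p = x
      have hl1 : l' = 1 := last_eq_one x l' hx hT hlast.1 hlast.2
      rw [hfst, hs0, if_pos rfl, hl1]
      have hdd : PySem.Int.floordiv x x = 1 := by
        rw [PySem.Int.floordiv_eq_ediv_of_pos (by omega)]
        exact Int.ediv_self (by omega)
      rw [hdd]
    · -- s is the smallest factor > 1; the largest proper divisor is x / s
      set s := (altLoop x 1 0 0 (le_refl 1)).2 with hsdef
      obtain ⟨⟨hs1, hsx, hsdvd⟩, hs2', hs2, hss⟩ := by
        simpa only [Td, Finset.mem_filter, mem_Dv] using hsmem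
      have hmul : s * l' = x := last_eq_cofactor x l' s hx hsmem hsmin hlast.1 hlast.2
      rw [hfst, if_neg (by omega : ¬ s = 0)]
      have hds : PySem.Int.floordiv x s = l' := by
        rw [PySem.Int.floordiv_eq_ediv_of_pos (by omega), ← hmul]
        exact Int.mul_ediv_cancel_left l' (by omega)
      rw [hds]
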